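-- pv_equiv track=rewrite | github.com/honeyuheony/Algorithm_with_python | programmers/lv1/92334.py | solution
-- ===== SOURCE A (Python) =====
-- def solution(id_list, report, k):
--     report_dict = {i: set() for i in id_list}
--     answer_dict = {i: 0 for i in id_list}
--     for r in report:
--         a, b = r.split()
--         report_dict[b].add(a)
--     for i in id_list:
--         if len(report_dict[i]) >= k:
--             for id in report_dict[i]:
--                 answer_dict[id] += 1
--     return [answer_dict[i] for i in id_list]
-- ===== SOURCE B (Python) =====
-- def solution(id_list, report, k):
--     pairs = {tuple(r.split()) for r in report}
--     targets = [b for _, b in pairs]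
--     mailed = {b for b in targets if targets.count(b) >= k}
--     return [len({b for a, b in pairs if a == i and b in mailed}) for i in id_list]
-- ===== Notes on version B (the rewrite author's own statement) =====
-- stated objective: alternative
-- what changed: Replaces A's per-target dict of reporter-sets and its increment passes over an answer dict with a declarative computation: one flat set of (reporter, reported) pairs, a set of 'mailed' targets (reported by >= k distinct reporters, found by counting in the target list), and each output entry computed directly as the size of the set of that user's reported targets that were mailed - no dicts and no += anywhere.
-- intended difference: When id_list contains a duplicated id that is reported by at least k distinct reporters, A's outer loop visits it once per duplicate occurrence and credits each of its reporters that many times (e.g. [2,2] on (['a','a'],['a a'],1)) while B counts each distinct reported target once ([1,1]), the intended count since a duplicated user id is still one user. — e.g. on solution(["a", "a"], ["a a"], 1): A returns [2, 2], B returns [1, 1]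
import Mathlib
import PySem

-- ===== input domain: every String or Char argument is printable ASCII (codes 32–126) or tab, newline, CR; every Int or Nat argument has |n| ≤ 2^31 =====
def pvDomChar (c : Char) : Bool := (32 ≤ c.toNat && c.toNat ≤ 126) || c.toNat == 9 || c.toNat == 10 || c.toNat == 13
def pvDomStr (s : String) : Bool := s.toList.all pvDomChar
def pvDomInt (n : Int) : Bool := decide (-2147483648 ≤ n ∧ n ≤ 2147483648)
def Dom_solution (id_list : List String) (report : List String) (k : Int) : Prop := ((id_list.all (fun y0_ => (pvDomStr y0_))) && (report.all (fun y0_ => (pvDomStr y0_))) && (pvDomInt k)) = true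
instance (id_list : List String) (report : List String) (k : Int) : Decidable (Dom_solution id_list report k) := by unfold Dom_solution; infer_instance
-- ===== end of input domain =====

-- B replaces A's dict-of-sets and its increment passes with a declarative computation:
-- a flat set of (reporter, reported) pairs, a set of 'mailed' targets (reported by >= k
-- distinct reporters), and each output entry computed directly as the size of the set of
-- that user's reported targets that were mailed (objective: alternative).

-- ===== PORT A =====
-- 'a, b = r.split()' : total form of unpacking r.split() into a pair; exact whenever
-- r splits into exactly two words (guaranteed by Pre_; Python raises ValueError otherwise).
def pvUnpack2 (r : String) : String × String :=
  match PySem.Str.split₀ r with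
  | [a, b] => (a, b)
  | _ => ("", "")

def solution (id_list : List String) (report : List String) (k : Int) : List Int :=
  let report_dict : PySem.Dict String (PySem.Set String) :=
    id_list.foldl (fun d i => d.insert i PySem.Set.empty) PySem.Dict.empty
  let answer_dict : PySem.Dict String Int :=
    id_list.foldl (fun d i => d.insert i 0) PySem.Dict.empty
  let report_dict := report.foldl (fun d r =>
    d.modify (pvUnpack2 r).2 PySem.Set.empty (fun s => PySem.Set.add s (pvUnpack2 r).1)) report_dict
  let answer_dict := id_list.foldl (fun ad i =>
    if k ≤ PySem.Set.len (report_dict.getD i PySem.Set.empty) then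
      (report_dict.getD i PySem.Set.empty).foldl (fun ad id => ad.modify id 0 (· + 1)) ad
    else ad) answer_dict
  id_list.map (fun i => answer_dict.getD i 0)

-- ===== PORT B =====
def solution_alt (id_list : List String) (report : List String) (k : Int) : List Int :=
  let pairs : PySem.Set (String × String) :=
    report.foldl (fun s r => PySem.Set.add s (pvUnpack2 r)) PySem.Set.empty
  let targets : List String := pairs.map (fun p => p.2)
  let mailed : PySem.Set String :=
    PySem.Set.ofList (targets.filter (fun b => k ≤ (targets.count b : Int)))
  id_list.map (fun i =>
    PySem.Set.len (PySem.Set.ofList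
      ((pairs.filter (fun p => p.1 == i && mailed.contains p.2)).map (fun p => p.2))))

-- ===== PRECONDITION & SPEC =====
-- Pre_ excludes exactly the inputs on which A raises: reports that do not split into
-- exactly two words (ValueError), reports whose reported id is not in id_list (KeyError),
-- and reports whose reporter is unknown while the reported id reaches the threshold k
-- (KeyError when A distributes the counts).
def Pre_solution (id_list : List String) (report : List String) (k : Int) : Prop :=
  ∀ r ∈ report, (PySem.Str.split₀ r).length = 2 ∧
    (PySem.Str.split₀ r).getD 1 "" ∈ id_list ∧
    ((PySem.Str.split₀ r).getD 0 "" ∈ id_list ∨ (((PySem.List.dedup (report.map (fun x => ((PySem.Str.split₀ x).getD 0 "", (PySem.Str.split₀ x).getD 1 "")))).map (fun p => p.2)).count ((PySem.Str.split₀ r).getD 1 "") : Int) < k)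
instance (id_list : List String) (report : List String) (k : Int) : Decidable (Pre_solution id_list report k) := by unfold Pre_solution; infer_instance
def pvWitness_solution : List String × List String × Int := (["muzi", "frodo", "apeach", "neo"], ["muzi frodo", "apeach frodo", "frodo neo", "muzi neo", "apeach muzi"], 2)
-- When id_list contains a duplicated id that is reported by at least k distinct reporters,
-- A's outer loop visits that id once per duplicate occurrence and credits each of its
-- reporters several times, while B counts each distinct reported target once —
-- the intended count, since a duplicated user id is still one user.
def D_solution (id_list : List String) (report : List String) (k : Int) : Prop :=
  ∃ p ∈ PySem.List.dedup (report.map pvUnpack2), 2 ≤ id_list.count p.2 ∧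
    k ≤ (((PySem.List.dedup (report.map pvUnpack2)).map (fun q => q.2)).count p.2 : Int)
instance (id_list : List String) (report : List String) (k : Int) : Decidable (D_solution id_list report k) := by unfold D_solution; infer_instance
def Spec_solution (id_list : List String) (report : List String) (k : Int) (out : List Int) : Prop := ¬ D_solution id_list report k → out = solution_alt id_list report k
instance (id_list : List String) (report : List String) (k : Int) (out : List Int) : Decidable (Spec_solution id_list report k out) := by unfold Spec_solution; infer_instance
def pvDiffWitness_solution : List String × List String × Int := (["a", "a"], ["a a"], 1)
def pvDiffWitnessOut_solution : (List Int) × (List Int) := ([2, 2], [1, 1])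

-- ===== CLAIM (what is proved, stated in full; the proofs are below) =====
def Claim_unchanged_solution : Prop := ∀ (id_list : List String) (report : List String) (k : Int), Dom_solution id_list report k → Pre_solution id_list report k → Spec_solution id_list report k (solution id_list report k)
def Claim_changed_solution : Prop := Dom_solution (pvDiffWitness_solution.1) (pvDiffWitness_solution.2.1) (pvDiffWitness_solution.2.2) ∧ Pre_solution (pvDiffWitness_solution.1) (pvDiffWitness_solution.2.1) (pvDiffWitness_solution.2.2) ∧ D_solution (pvDiffWitness_solution.1) (pvDiffWitness_solution.2.1) (pvDiffWitness_solution.2.2) ∧ solution (pvDiffWitness_solution.1) (pvDiffWitness_solution.2.1) (pvDiffWitness_solution.2.2) = pvDiffWitnessOut_solution.1 ∧ solution_alt (pvDiffWitness_solution.1) (pvDiffWitness_solution.2.1) (pvDiffWitness_solution.2.2) = pvDiffWitnessOut_solution.2 ∧ pvDiffWitnessOut_solution.1 ≠ pvDiffWitnessOut_solution.2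
def Claim_exact_solution : Prop := ∀ (id_list : List String) (report : List String) (k : Int), Dom_solution id_list report k → Pre_solution id_list report k → D_solution id_list report k → solution id_list report k ≠ solution_alt id_list report k

-- ===== LEMMAS AND PROOFS =====
-- getD after initialising every key to the same constant is that constant
theorem pv_getD_foldl_insert_const {ν : Type} (xs : List String) (c : ν) (i : String)
    (d : PySem.Dict String ν) (hd : d.getD i c = c) :
    (xs.foldl (fun d x => d.insert x c) d).getD i c = c := by
  induction xs generalizing d with
  | nil => simpa using hd
  | cons x xs ih =>
    simp only [List.foldl_cons]
    exact ih _ (by rw [PySem.Dict.getD_insert]; split <;> simp [hd])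

-- report_dict loop: the set stored at b collects the first components of pairs targeting b
theorem pv_getD_foldl_modify_add (L : List (String × String))
    (d : PySem.Dict String (PySem.Set String)) (b : String) :
    (L.foldl (fun d p => d.modify p.2 PySem.Set.empty (fun s => PySem.Set.add s p.1)) d).getD b PySem.Set.empty
      = PySem.Set.update (d.getD b PySem.Set.empty) ((L.filter (fun p => p.2 == b)).map (·.1)) := by
  induction L generalizing d with
  | nil => simp [PySem.Set.update]
  | cons p L ih =>
    simp only [List.foldl_cons, List.filter_cons]
    rw [ih]
    by_cases hb : p.2 = b
    · simp [hb, PySem.Set.update]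
    · have : (p.2 == b) = false := by simpa using hb
      simp [this, PySem.Dict.getD_modify, Ne.symm hb]

theorem pv_dedup_append {α : Type} [BEq α] [LawfulBEq α] [DecidableEq α] (l : List α) (x : α) :
    PySem.List.dedup (l ++ [x]) = if x ∈ l then PySem.List.dedup l else PySem.List.dedup l ++ [x] := by
  simp only [PySem.List.dedup_eq_ofList, PySem.Set.ofList_eq_foldl, List.foldl_append, List.foldl_cons, List.foldl_nil]
  rw [show List.foldl PySem.Set.add [] l = PySem.Set.ofList l from (PySem.Set.ofList_eq_foldl l).symm]
  by_cases hx : x ∈ l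
  · simp [PySem.Set.add, PySem.Set.contains, PySem.Set.mem_ofList, hx]
  · simp [PySem.Set.add, PySem.Set.contains, PySem.Set.mem_ofList, hx]

theorem pv_filter_dedup {α : Type} [BEq α] [LawfulBEq α] [DecidableEq α] (p : α → Bool) (l : List α) :
    (PySem.List.dedup l).filter p = PySem.List.dedup (l.filter p) := by
  induction l using List.reverseRecOn with
  | nil => simp [PySem.List.dedup, PySem.Set.ofList]
  | append_singleton l x ih =>
    rw [pv_dedup_append, List.filter_append]
    by_cases hx : x ∈ l
    · by_cases hp : p x
      · have hxf : x ∈ l.filter p := List.mem_filter.mpr ⟨hx, hp⟩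
        rw [if_pos hx, ih, List.filter_cons, if_pos hp, List.filter_nil,
          pv_dedup_append, if_pos hxf]
      · rw [if_pos hx, ih, List.filter_cons, if_neg hp, List.filter_nil, List.append_nil]
    · by_cases hp : p x
      · have hxf : x ∉ l.filter p := fun h => hx (List.mem_filter.mp h).1
        rw [if_neg hx, List.filter_append, ih, List.filter_cons, if_pos hp, List.filter_nil,
          pv_dedup_append, if_neg hxf]
      · rw [if_neg hx, List.filter_append, ih, List.filter_cons, if_neg hp, List.filter_nil]
        simp

theorem pv_dedup_map_inj {α β : Type} [BEq α] [LawfulBEq α] [DecidableEq α] [BEq β] [LawfulBEq β] [DecidableEq β]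
    (f : α → β) (l : List α) (hinj : ∀ x ∈ l, ∀ y ∈ l, f x = f y → x = y) :
    PySem.List.dedup (l.map f) = (PySem.List.dedup l).map f := by
  induction l using List.reverseRecOn with
  | nil => simp [PySem.List.dedup, PySem.Set.ofList]
  | append_singleton l x ih =>
    have hsub : ∀ x ∈ l, ∀ y ∈ l, f x = f y → x = y := by
      intro a ha b hb; exact hinj a (by simp [ha]) b (by simp [hb])
    have hmem : f x ∈ l.map f ↔ x ∈ l := by
      constructor
      · rintro h
        obtain ⟨y, hy, hxy⟩ := List.mem_map.mp h
        exact (hinj y (by simp [hy]) x (by simp) hxy) ▸ hy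
      · intro h; exact List.mem_map_of_mem h
    rw [List.map_append, List.map_cons, List.map_nil, pv_dedup_append, pv_dedup_append]
    by_cases hx : x ∈ l
    · rw [if_pos hx, if_pos (hmem.mpr hx), ih hsub]
    · rw [if_neg hx, if_neg (fun h => hx (hmem.mp h)), ih hsub, List.map_append, List.map_cons, List.map_nil]

theorem pv_sum_indicator {α : Type} (l : List α) (p : α → Prop) [DecidablePred p] :
    (l.map (fun x => if p x then (1 : Int) else 0)).sum = ((l.filter (fun x => decide (p x))).length : Int) := by
  induction l with
  | nil => simp
  | cons x l ih =>
    by_cases hx : p x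
    · simp [hx, ih]
      omega
    · simp [hx, ih]


-- A's answer loop: outer fold over ids with a conditional inner counting fold
theorem pv_getD_foldl_outer (ids : List String) (S : String → PySem.Set String)
    (cond : String → Prop) [DecidablePred cond] (d : PySem.Dict String Int) (i : String) :
    (ids.foldl (fun ad b => if cond b then (S b).foldl (fun ad id => ad.modify id 0 (· + 1)) ad else ad) d).getD i 0
      = d.getD i 0 + (ids.map (fun b => if cond b then ((S b).count i : Int) else 0)).sum := by
  induction ids generalizing d with
  | nil => simp
  | cons b ids ih =>
    simp only [List.foldl_cons, List.map_cons, List.sum_cons]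
    by_cases hb : cond b
    · rw [if_pos hb, ih, PySem.Dict.getD_foldl_modify_add_one, if_pos hb]; ring
    · rw [if_neg hb, ih, if_neg hb]; ring

-- the central counting identity
theorem pv_main_count (ids : List String) (hnd : ids.Nodup) (P : List (String × String))
    (hP : P.Nodup) (hmem : ∀ p ∈ P, p.2 ∈ ids) (c : String → Prop) [DecidablePred c] (i : String) :
    (ids.map (fun b => if c b ∧ (i, b) ∈ P then (1 : Int) else 0)).sum
      = (((P.filter (fun p => decide (c p.2))).map (·.1)).count i : Int) := by
  rw [pv_sum_indicator]
  have hrhs : ((P.filter (fun p => decide (c p.2))).map (·.1)).count i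
      = (P.filter (fun p => p.1 == i && decide (c p.2))).length := by
    rw [List.count_eq_countP, List.countP_map, List.countP_filter, ← List.countP_eq_length_filter]
    rfl
  rw [hrhs]
  have hperm : List.Perm ((ids.filter (fun b => decide (c b ∧ (i, b) ∈ P))).map (fun b => (i, b)))
      (P.filter (fun p => p.1 == i && decide (c p.2))) := by
    rw [List.perm_ext_iff_of_nodup]
    · intro p
      simp only [List.mem_map, List.mem_filter, decide_eq_true_eq, Bool.and_eq_true, beq_iff_eq]
      constructor
      · rintro ⟨b, ⟨hb, hcb, hibP⟩, rfl⟩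
        exact ⟨hibP, rfl, hcb⟩
      · rintro ⟨hpP, hpi, hcp⟩
        exact ⟨p.2, ⟨hmem p hpP, hcp, by rw [← hpi]; exact hpP⟩, by rw [← hpi]⟩
    · exact List.Nodup.map (fun a b h => by injection h) (hnd.filter _)
    · exact hP.filter _
  have := hperm.length_eq
  rw [List.length_map] at this
  rw [this]


-- distinct reporters of b among the deduped pairs = size of A's reporter set for b
theorem pv_len_eq (L : List (String × String)) (b : String) :
    (PySem.List.dedup ((L.filter (fun p => p.2 == b)).map (·.1))).length
      = ((PySem.List.dedup L).map (·.2)).count b := by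
  have hinj : ∀ x ∈ L.filter (fun p => p.2 == b), ∀ y ∈ L.filter (fun p => p.2 == b),
      (x.1 : String) = y.1 → x = y := by
    intro x hx y hy hxy
    have hx2 : x.2 = b := by simpa using (List.mem_filter.mp hx).2
    have hy2 : y.2 = b := by simpa using (List.mem_filter.mp hy).2
    exact Prod.ext hxy (hx2.trans hy2.symm)
  rw [pv_dedup_map_inj _ _ hinj, List.length_map, ← pv_filter_dedup,
    List.count_eq_countP, List.countP_map, ← List.countP_eq_length_filter]
  rfl

theorem pv_mem_S (L : List (String × String)) (b i : String) :
    i ∈ PySem.List.dedup ((L.filter (fun p => p.2 == b)).map (·.1)) ↔ (i, b) ∈ PySem.List.dedup L := by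
  rw [PySem.List.mem_dedup, PySem.List.mem_dedup]
  simp only [List.mem_map, List.mem_filter, beq_iff_eq]
  constructor
  · rintro ⟨p, ⟨hp, hb⟩, hi⟩
    have : p = (i, b) := Prod.ext hi hb
    exact this ▸ hp
  · intro h
    exact ⟨(i, b), ⟨h, rfl⟩, rfl⟩

theorem pv_split_two (r : String) (h : (PySem.Str.split₀ r).length = 2) :
    PySem.Str.split₀ r = [(pvUnpack2 r).1, (pvUnpack2 r).2] := by
  unfold pvUnpack2
  match hs : PySem.Str.split₀ r with
  | [a, b] => simp
  | [] => simp [hs] at h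
  | [a] => simp [hs] at h
  | a :: b :: c :: t => simp [hs] at h

-- a sum over a list with duplicates equals the sum over its dedup when duplicated
-- elements contribute 0
theorem pv_sum_dedup {α : Type} [BEq α] [LawfulBEq α] [DecidableEq α] (l : List α) (f : α → Int)
    (hz : ∀ b ∈ l, 2 ≤ l.count b → f b = 0) :
    (l.map f).sum = ((PySem.List.dedup l).map f).sum := by
  induction l using List.reverseRecOn with
  | nil => simp [PySem.List.dedup, PySem.Set.ofList]
  | append_singleton l x ih =>
    have hz' : ∀ b ∈ l, 2 ≤ l.count b → f b = 0 := by
      intro b hb hc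
      exact hz b (by simp [hb]) (by rw [List.count_append]; omega)
    rw [List.map_append, List.sum_append, pv_dedup_append, ih hz']
    by_cases hx : x ∈ l
    · have hfx : f x = 0 := by
        refine hz x (by simp) ?_
        rw [List.count_append]
        have := List.count_pos_iff.mpr hx
        simp; omega
      simp [hx, hfx]
    · simp [hx]

def pvTerm (report : List String) (k : Int) (i b : String) : Int :=
  if (k ≤ (List.count b ((PySem.List.dedup (report.map pvUnpack2)).map (fun p => p.2)) : Int))
      ∧ (i, b) ∈ PySem.List.dedup (report.map pvUnpack2) then 1 else 0

-- A's output, characterised per id: a sum over id_list (with multiplicity) of indicators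
theorem pv_charA (ids report : List String) (k : Int) :
    solution ids report k = ids.map (fun i => (ids.map (fun b => pvTerm report k i b)).sum) := by
  unfold solution
  dsimp only
  apply List.map_congr_left
  intro i hi
  have hA : List.foldl (fun d r => d.modify (pvUnpack2 r).2 PySem.Set.empty fun s => s.add (pvUnpack2 r).1)
        (List.foldl (fun d i => d.insert i PySem.Set.empty) PySem.Dict.empty ids) report
      = List.foldl (fun d (p : String × String) => d.modify p.2 PySem.Set.empty fun s => s.add p.1)
        (List.foldl (fun d i => d.insert i PySem.Set.empty) PySem.Dict.empty ids) (report.map pvUnpack2) := by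
    rw [List.foldl_map]
  simp only [hA]
  have hS : ∀ b, (List.foldl (fun d (p : String × String) => d.modify p.2 PySem.Set.empty fun s => s.add p.1)
        (List.foldl (fun d i => d.insert i PySem.Set.empty) PySem.Dict.empty ids) (report.map pvUnpack2)).getD b PySem.Set.empty
      = PySem.List.dedup (((report.map pvUnpack2).filter (fun p => p.2 == b)).map (·.1)) := by
    intro b
    rw [pv_getD_foldl_modify_add, pv_getD_foldl_insert_const ids PySem.Set.empty b PySem.Dict.empty
      (PySem.Dict.getD_empty _ _), PySem.Set.update_empty, ← PySem.List.dedup_eq_ofList]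
  simp only [hS]
  rw [pv_getD_foldl_outer ids
    (fun b => PySem.List.dedup (((report.map pvUnpack2).filter (fun p => p.2 == b)).map (·.1)))
    (fun b => k ≤ PySem.Set.len (PySem.List.dedup (((report.map pvUnpack2).filter (fun p => p.2 == b)).map (·.1)))),
    pv_getD_foldl_insert_const ids 0 i PySem.Dict.empty (PySem.Dict.getD_empty _ _), zero_add]
  have hterm : ∀ b, (if k ≤ PySem.Set.len (PySem.List.dedup (((report.map pvUnpack2).filter (fun p => p.2 == b)).map (·.1)))
        then (List.count i (PySem.List.dedup (((report.map pvUnpack2).filter (fun p => p.2 == b)).map (·.1))) : Int) else 0)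
      = pvTerm report k i b := by
    intro b
    unfold pvTerm
    rw [PySem.Set.len_eq, pv_len_eq]
    by_cases hib : (i, b) ∈ PySem.List.dedup (report.map pvUnpack2)
    · rw [List.count_eq_one_of_mem (PySem.List.nodup_dedup _) ((pv_mem_S _ _ _).mpr hib)]
      split_ifs with h1 h2 h3
      · simp
      · exact absurd ⟨h1, hib⟩ h2
      · exact absurd h3.1 h1
      · rfl
    · rw [List.count_eq_zero_of_not_mem (fun h => hib ((pv_mem_S _ _ _).mp h))]
      split_ifs with h1 h2 h3
      · exact absurd h2.2 hib
      · simp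
      · exact absurd h3.2 hib
      · rfl
  simp only [hterm]

-- B's output, characterised per id: the same sum over the DEDUPLICATED id_list
theorem pv_charB (ids report : List String) (k : Int)
    (hrep : ∀ r ∈ report, (PySem.Str.split₀ r).length = 2 ∧ (PySem.Str.split₀ r).getD 1 "" ∈ ids) :
    solution_alt ids report k = ids.map (fun i => ((PySem.List.dedup ids).map (fun b => pvTerm report k i b)).sum) := by
  unfold solution_alt
  dsimp only
  apply List.map_congr_left
  intro i hi
  have hpairs : List.foldl (fun s r => s.add (pvUnpack2 r)) PySem.Set.empty report
      = PySem.List.dedup (report.map pvUnpack2) := by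
    rw [PySem.List.dedup_eq_ofList, PySem.Set.ofList_eq_foldl, List.foldl_map]
    rfl
  simp only [hpairs]
  set P := PySem.List.dedup (report.map pvUnpack2) with hP
  set targets := P.map (fun p => p.2) with htg
  set c : String → Prop := fun b => k ≤ (targets.count b : Int) with hc
  -- the membership test against 'mailed' reduces, on a pair of P, to the count condition
  have hmtest : ∀ p ∈ P, (p.1 == i && (PySem.Set.ofList (targets.filter (fun b => k ≤ (targets.count b : Int)))).contains p.2)
      = (p.1 == i && decide (c p.2)) := by
    intro p hp
    have hpt : p.2 ∈ targets := List.mem_map_of_mem hp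
    by_cases hck : c p.2
    · have : (PySem.Set.ofList (targets.filter (fun b => k ≤ (targets.count b : Int)))).contains p.2 = true := by
        simp [PySem.Set.contains, PySem.Set.mem_ofList, List.mem_filter, hpt]
        exact hck
      rw [this]
      simp [hck]
    · have : (PySem.Set.ofList (targets.filter (fun b => k ≤ (targets.count b : Int)))).contains p.2 = false := by
        have hck' : ¬ (k ≤ ((targets.count p.2 : Nat) : Int)) := hck
        simp [PySem.Set.contains, PySem.Set.mem_ofList, List.mem_filter]
        intro _
        omega
      rw [this]
      simp [hck]
  rw [List.filter_congr hmtest]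
  -- the filtered pairs all have first component i, so mapping .2 keeps them distinct
  have hnodupL : ((P.filter (fun p => p.1 == i && decide (c p.2))).map (fun p => p.2)).Nodup := by
    refine List.Nodup.map_on ?_ ((PySem.List.nodup_dedup _).filter _)
    intro x hx y hy hxy
    have hx1 : x.1 = i := by
      have := (List.mem_filter.mp hx).2
      simp only [Bool.and_eq_true, beq_iff_eq] at this
      exact this.1
    have hy1 : y.1 = i := by
      have := (List.mem_filter.mp hy).2
      simp only [Bool.and_eq_true, beq_iff_eq] at this
      exact this.1
    exact Prod.ext (hx1.trans hy1.symm) hxy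
  rw [PySem.Set.ofList_eq_self_of_nodup _ hnodupL, PySem.Set.len_eq, List.length_map]
  -- the filter's length is the count of i among reporters of mailed targets
  have hlen : (P.filter (fun p => p.1 == i && decide (c p.2))).length
      = ((P.filter (fun p => decide (c p.2))).map (·.1)).count i := by
    rw [List.count_eq_countP, List.countP_map, List.countP_filter, ← List.countP_eq_length_filter]
    apply List.countP_congr
    intro p hp
    simp
  rw [hlen]
  have hmem : ∀ p ∈ P, p.2 ∈ PySem.List.dedup ids := by
    intro p hp
    rw [hP, PySem.List.mem_dedup] at hp
    obtain ⟨r, hr, rfl⟩ := List.mem_map.mp hp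
    have h2 := (hrep r hr).2
    rw [pv_split_two r (hrep r hr).1] at h2
    rw [PySem.List.mem_dedup]
    simpa using h2
  have hmc := pv_main_count (PySem.List.dedup ids) (PySem.List.nodup_dedup ids) P
    (PySem.List.nodup_dedup _) hmem c i
  rw [← hmc]
  rfl

-- under Pre_, the getD-pair parse and pvUnpack2 agree on every report line
theorem pv_mapeq (report : List String) (hlen : ∀ r ∈ report, (PySem.Str.split₀ r).length = 2) :
    report.map (fun x => ((PySem.Str.split₀ x).getD 0 "", (PySem.Str.split₀ x).getD 1 ""))
      = report.map pvUnpack2 := by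
  refine List.map_congr_left (fun r hr => ?_)
  rw [pv_split_two r (hlen r hr)]
  simp

theorem pv_map_eq_pointwise {α β : Type} (l : List α) (f g : α → β) (h : l.map f = l.map g) :
    ∀ x ∈ l, f x = g x := by
  induction l with
  | nil => simp
  | cons x l ih =>
    simp only [List.map_cons, List.cons.injEq] at h
    intro y hy
    rcases List.mem_cons.mp hy with rfl | hy
    · exact h.1
    · exact ih h.2 y hy

theorem pv_sum_dedup_le {α : Type} [BEq α] [LawfulBEq α] [DecidableEq α] (l : List α) (f : α → Int)
    (hnn : ∀ b ∈ l, 0 ≤ f b) :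
    ((PySem.List.dedup l).map f).sum ≤ (l.map f).sum := by
  induction l using List.reverseRecOn with
  | nil => simp [PySem.List.dedup, PySem.Set.ofList]
  | append_singleton l x ih =>
    have hnn' : ∀ b ∈ l, 0 ≤ f b := fun b hb => hnn b (by simp [hb])
    have hfx : 0 ≤ f x := hnn x (by simp)
    rw [List.map_append, List.sum_append, List.map_cons, List.map_nil, List.sum_cons, List.sum_nil, pv_dedup_append]
    by_cases hx : x ∈ l
    · simp only [hx, if_true]
      have := ih hnn'
      omega
    · simp only [hx, if_false, List.map_append, List.sum_append, List.map_cons, List.map_nil, List.sum_cons, List.sum_nil]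
      have := ih hnn'
      omega

-- strict version: a duplicated element with a positive contribution makes the sum over
-- the raw list strictly larger than over its dedup
theorem pv_sum_dedup_lt {α : Type} [BEq α] [LawfulBEq α] [DecidableEq α] (l : List α) (f : α → Int)
    (hnn : ∀ b ∈ l, 0 ≤ f b) (b : α) (hb : b ∈ l) (hc : 2 ≤ l.count b) (hf : 0 < f b) :
    ((PySem.List.dedup l).map f).sum < (l.map f).sum := by
  induction l using List.reverseRecOn with
  | nil => simp at hb
  | append_singleton l x ih =>
    have hnn' : ∀ c ∈ l, 0 ≤ f c := fun c hcm => hnn c (by simp [hcm])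
    have hfx : 0 ≤ f x := hnn x (by simp)
    rw [List.map_append, List.sum_append, List.map_cons, List.map_nil, List.sum_cons, List.sum_nil, pv_dedup_append]
    by_cases hx : x ∈ l
    · simp only [hx, if_true]
      rcases lt_or_eq_of_le hfx with hpos | hzero
      · have hle := pv_sum_dedup_le l f hnn'
        omega
      · have hbx : b ≠ x := by
          rintro rfl
          omega
        have hbl : b ∈ l := by
          rcases List.mem_append.mp hb with h | h
          · exact h
          · simp at h
            exact absurd h hbx
        have hcl : 2 ≤ l.count b := by
          rw [List.count_append] at hc
          have h0 : List.count b [x] = 0 := List.count_eq_zero.mpr (by simp [hbx])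
          omega
        have := ih hnn' hbl hcl
        omega
    · simp only [hx, if_false, List.map_append, List.sum_append, List.map_cons, List.map_nil, List.sum_cons, List.sum_nil]
      have hbx : b ≠ x := by
        rintro rfl
        rw [List.count_append] at hc
        have : l.count b = 0 := List.count_eq_zero_of_not_mem hx
        simp [this] at hc
      have hbl : b ∈ l := by
        rcases List.mem_append.mp hb with h | h
        · exact h
        · simp at h
          exact absurd h hbx
      have hcl : 2 ≤ l.count b := by
        rw [List.count_append] at hc
        have h0 : List.count b [x] = 0 := List.count_eq_zero.mpr (by simp [hbx])
        omega
      have := ih hnn' hbl hcl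
      omega

-- ===== VERDICT (by name: the statement is the Claim_ definition above) =====
theorem solution_spec : Claim_unchanged_solution := by
  intro ids report k hdom hpre hnD
  have hrep : ∀ r ∈ report, (PySem.Str.split₀ r).length = 2 ∧ (PySem.Str.split₀ r).getD 1 "" ∈ ids :=
    fun r hr => ⟨(hpre r hr).1, (hpre r hr).2.1⟩
  rw [pv_charA ids report k, pv_charB ids report k hrep]
  apply List.map_congr_left
  intro i hi
  refine pv_sum_dedup ids _ ?_
  intro b hb hcount
  unfold pvTerm
  rw [if_neg]
  rintro ⟨hk, hibP⟩
  exact hnD ⟨(i, b), hibP, hcount, hk⟩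

theorem solution_changed : Claim_changed_solution := by unfold Claim_changed_solution; decide

theorem solution_tight : Claim_exact_solution := by
  intro ids report k hdom hpre hD heq
  have hrep : ∀ r ∈ report, (PySem.Str.split₀ r).length = 2 ∧ (PySem.Str.split₀ r).getD 1 "" ∈ ids :=
    fun r hr => ⟨(hpre r hr).1, (hpre r hr).2.1⟩
  have hlen : ∀ r ∈ report, (PySem.Str.split₀ r).length = 2 := fun r hr => (hpre r hr).1
  obtain ⟨p, hpP, hdup, hkD⟩ := hD
  obtain ⟨r, hr, hpr⟩ := List.mem_map.mp ((PySem.List.mem_dedup _ _).mp hpP)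
  have hgd : (PySem.Str.split₀ r).getD 1 "" = p.2 := by
    rw [pv_split_two r (hlen r hr), hpr]
    simp
  have hgd0 : (PySem.Str.split₀ r).getD 0 "" = p.1 := by
    rw [pv_split_two r (hlen r hr), hpr]
    simp
  -- the reporter of p must be a known id, else A would raise (excluded by Pre_)
  have ha : p.1 ∈ ids := by
    rcases (hpre r hr).2.2 with h | h
    · rwa [hgd0] at h
    · rw [hgd, pv_mapeq report hlen] at h
      omega
  have hab : (p.1, p.2) ∈ PySem.List.dedup (report.map pvUnpack2) := by
    simpa using hpP
  have hb : p.2 ∈ ids := by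
    have := List.count_pos_iff.mp (by omega : 0 < ids.count p.2)
    exact this
  have hterm1 : pvTerm report k p.1 p.2 = 1 := by
    unfold pvTerm
    exact if_pos ⟨hkD, hab⟩
  have hnn : ∀ b ∈ ids, 0 ≤ pvTerm report k p.1 b := by
    intro b hbm
    unfold pvTerm
    split_ifs <;> omega
  have hlt := pv_sum_dedup_lt ids (pvTerm report k p.1) hnn p.2 hb hdup
    (by rw [hterm1]; omega)
  rw [pv_charA ids report k, pv_charB ids report k hrep] at heq
  have := pv_map_eq_pointwise ids _ _ heq p.1 ha
  exact absurd this.symm (ne_of_lt hlt)
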